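-- pv_equiv track=rewrite | github.com/Ypoonia/TryAi | app/services/comprehensive_store_report_service.py | _build_status_spans_carry_forward
-- ===== SOURCE A (Python) =====
-- from typing import Dict, List, Any, Optional, Tuple, Set
--
-- def _build_status_spans_carry_forward(polls_idx: List[Tuple[int,str]], W: Tuple[int,int]) -> List[Tuple[int,int,str]]:
--     """
--     Pure carry-forward + seed-before timeline (no midpoint, no 23:00)
--     polls_idx: (k, status) where k is minute index vs now_s_local
--     """
--     if not polls_idx:
--         return [(W[0], W[1], 'inactive')]
--
--     # seed = last poll at or BEFORE band start (k >= 10080)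
--     start_k = W[1]-1  # 10080
--     seed_status = 'inactive'  # fallback
--
--     # find the minimal k >= start_k (closest to start_k)
--     candidates = [(k, s) for (k, s) in polls_idx if k >= start_k]
--     if candidates:
--         k_min, s_min = min(candidates, key=lambda x: x[0])  # closest to start_k
--         seed_status = s_min
--     else:
--         # No pre-window poll found, check if we have in-window polls
--         in_window_polls = [(k, s) for (k, s) in polls_idx if W[0] <= k < W[1]]
--         if in_window_polls:
--             # Use the earliest in-window status rather than hard 'inactive'
--             first_in_k, first_in_s = min(in_window_polls, key=lambda x: x[0])
--             seed_status = first_in_s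
--
--     # window polls (ascending k makes sense if you always create (min,max))
--     window_polls = [(k,s) for (k,s) in polls_idx if W[0] <= k < W[1]]
--     if not window_polls:
--         return [(W[0], W[1], seed_status)]
--
--     spans = []
--     prev_k = start_k
--     prev_s = seed_status
--
--     # Iterate from window start toward now: use DESCENDING k for clarity
--     for k, s in sorted(window_polls, key=lambda x: -x[0]):
--         # segment between [k, prev_k) has status = prev_s (carry-forward)
--         a, b = sorted((k, prev_k))
--         if a < b:
--             spans.append((a, b, prev_s))
--         prev_k, prev_s = k, s
--
--     # Tail to the window end (k=1)
--     a, b = sorted((W[0], prev_k))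
--     if a < b:
--         spans.append((a, b, prev_s))
--
--     # Merge adjacents
--     out = []
--     for st, en, stt in sorted(spans):
--         if out and out[-1][2] == stt and out[-1][1] == st:
--             out[-1] = (out[-1][0], en, stt)
--         else:
--             out.append((st, en, stt))
--     return out
-- ===== SOURCE B (Python) =====
-- def _build_status_spans_carry_forward(polls_idx, W):
--     """Single forward pass: one scan collects the seed candidates and a
--     last-status-per-minute dict, then one ascending sweep emits merged spans."""
--     lo, hi = W
--     if not polls_idx:
--         return [(lo, hi, 'inactive')]
--     start_k = hi - 1
--     best = None       # first poll with minimal k among k >= start_k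
--     first_in = None   # first poll with minimal in-window k
--     last_at = {}      # in-window k -> status of the last poll at that k
--     for k, s in polls_idx:
--         if k >= start_k:
--             if best is None or k < best[0]:
--                 best = (k, s)
--         if lo <= k < hi:
--             if first_in is None or k < first_in[0]:
--                 first_in = (k, s)
--             last_at[k] = s
--     if best is not None:
--         seed = best[1]
--     elif first_in is not None:
--         seed = first_in[1]
--     else:
--         seed = 'inactive'
--     if not last_at:
--         return [(lo, hi, seed)]
--     out = []
--     cur = lo
--     for k, s in sorted(last_at.items()):
--         if cur < k:
--             if out and out[-1][2] == s:
--                 out[-1] = (out[-1][0], k, s)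
--             else:
--                 out.append((cur, k, s))
--         cur = k
--     if cur < start_k:
--         if out and out[-1][2] == seed:
--             out[-1] = (out[-1][0], start_k, seed)
--         else:
--             out.append((cur, start_k, seed))
--     return out
-- ===== Notes on version B (the rewrite author's own statement) =====
-- stated objective: simpler
-- what changed: A's four comprehensions, descending carry-forward pass, second sort of the spans and separate adjacency-merge loop are replaced by one collecting pass over the polls (seed candidates tracked on the fly, a last-status-per-minute dict) followed by a single ascending sweep over the sorted dict items that emits already-sorted, already-merged spans.
import Mathlib
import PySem

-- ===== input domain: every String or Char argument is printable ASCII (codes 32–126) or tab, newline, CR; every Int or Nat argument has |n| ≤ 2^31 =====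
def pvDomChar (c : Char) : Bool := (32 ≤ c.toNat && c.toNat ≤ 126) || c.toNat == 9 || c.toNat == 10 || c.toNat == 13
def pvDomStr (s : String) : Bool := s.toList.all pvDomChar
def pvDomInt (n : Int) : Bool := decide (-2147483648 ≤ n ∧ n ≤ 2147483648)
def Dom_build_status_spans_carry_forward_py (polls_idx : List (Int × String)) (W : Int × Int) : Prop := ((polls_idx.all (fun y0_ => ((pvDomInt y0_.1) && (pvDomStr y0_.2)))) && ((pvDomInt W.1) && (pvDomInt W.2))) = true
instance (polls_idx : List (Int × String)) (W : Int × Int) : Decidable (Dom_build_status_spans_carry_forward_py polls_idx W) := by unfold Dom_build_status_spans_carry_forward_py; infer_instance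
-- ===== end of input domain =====

-- B = one collecting pass (seed candidates + last-status dict) and one ascending sweep that
-- emits already-merged spans: no descending pass, no second sort, no separate merge loop.

-- ===== PORT A =====
-- membership test 'W[0] <= k < W[1]'
def pvInWin (lo hi : Int) (p : Int × String) : Bool := decide (lo ≤ p.1) && decide (p.1 < hi)

-- loop body of A's descending carry-forward pass (state: spans, prev_k, prev_s)
def pvStepA (st : List (Int × Int × String) × Int × String) (p : Int × String) :
    List (Int × Int × String) × Int × String :=
  let a := min p.1 st.2.1       -- a, b = sorted((k, prev_k))
  let b := max p.1 st.2.1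
  (if a < b then st.1 ++ [(a, b, st.2.2)] else st.1, p.1, p.2)

-- loop body of A's final merge pass ('if out and out[-1][2] == stt and out[-1][1] == st')
def pvMergeA (out : List (Int × Int × String)) (sp : Int × Int × String) :
    List (Int × Int × String) :=
  match out.getLast? with
  | some last =>
      if last.2.2 = sp.2.2 ∧ last.2.1 = sp.1 then
        out.dropLast ++ [(last.1, sp.2.1, sp.2.2)]
      else out ++ [sp]
  | none => out ++ [sp]

def build_status_spans_carry_forward_py (polls_idx : List (Int × String)) (W : Int × Int) :
    List (Int × Int × String) :=
  if polls_idx = [] then [(W.1, W.2, "inactive")] else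
  let start_k := W.2 - 1
  let candidates := polls_idx.filter (fun p => decide (start_k ≤ p.1))
  let seed_status :=
    match PySem.List.min? candidates (fun p => p.1) with
    | some m => m.2
    | none =>
      match PySem.List.min? (polls_idx.filter (pvInWin W.1 W.2)) (fun p => p.1) with
      | some m => m.2
      | none => "inactive"
  let window_polls := polls_idx.filter (pvInWin W.1 W.2)
  if window_polls = [] then [(W.1, W.2, seed_status)] else
  let st := (PySem.List.sorted window_polls (fun p => -p.1) false).foldl pvStepA
      ([], start_k, seed_status)
  let a := min W.1 st.2.1
  let b := max W.1 st.2.1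
  let spans := if a < b then st.1 ++ [(a, b, st.2.2)] else st.1
  -- Python's sorted(spans) orders triples lexicographically; the spans built above always have
  -- pairwise distinct first components (starts strictly decrease as built, proved below), so the
  -- stable sort keyed on the first component computes exactly the same list.
  (PySem.List.sorted spans (fun x => x.1) false).foldl pvMergeA []

-- ===== PORT B =====
-- 'if k >= start_k: if best is None or k < best[0]: best = (k, s)'
def pvBestStep (stk : Int) (b : Option (Int × String)) (p : Int × String) : Option (Int × String) :=
  if decide (stk ≤ p.1) then
    match b with
    | none => some p
    | some m => if p.1 < m.1 then some p else some m
  else b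

-- 'if lo <= k < hi: if first_in is None or k < first_in[0]: first_in = (k, s)'
def pvFirstStep (lo hi : Int) (f : Option (Int × String)) (p : Int × String) :
    Option (Int × String) :=
  if pvInWin lo hi p then
    match f with
    | none => some p
    | some m => if p.1 < m.1 then some p else some m
  else f

-- 'if lo <= k < hi: last_at[k] = s'
def pvDictStep (lo hi : Int) (d : PySem.Dict Int String) (p : Int × String) :
    PySem.Dict Int String :=
  if pvInWin lo hi p then d.insert p.1 p.2 else d

-- one iteration of B's single collecting loop (best, first_in, last_at)
def pvStepB (lo hi stk : Int)
    (st : Option (Int × String) × Option (Int × String) × PySem.Dict Int String)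
    (p : Int × String) :
    Option (Int × String) × Option (Int × String) × PySem.Dict Int String :=
  (pvBestStep stk st.1 p, pvFirstStep lo hi st.2.1 p, pvDictStep lo hi st.2.2 p)

-- B's emit-and-merge: 'if cur < k: extend the last span if the status repeats, else append'
def pvEmitB (out : List (Int × Int × String)) (cur k : Int) (s : String) :
    List (Int × Int × String) :=
  if cur < k then
    match out.getLast? with
    | some last =>
        if last.2.2 = s then out.dropLast ++ [(last.1, k, s)] else out ++ [(cur, k, s)]
    | none => out ++ [(cur, k, s)]
  else out

def build_status_spans_carry_forward_py_alt (polls_idx : List (Int × String)) (W : Int × Int) :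
    List (Int × Int × String) :=
  if polls_idx = [] then [(W.1, W.2, "inactive")] else
  let lo := W.1
  let hi := W.2
  let stk := hi - 1
  let acc := polls_idx.foldl (pvStepB lo hi stk) (none, none, PySem.Dict.empty)
  let seed :=
    match acc.1 with
    | some b => b.2
    | none =>
      match acc.2.1 with
      | some f => f.2
      | none => "inactive"
  if acc.2.2.items = [] then [(lo, hi, seed)] else
  -- Python's sorted(last_at.items()) orders pairs lexicographically; dict keys are distinct, so
  -- the stable sort keyed on the key component computes exactly the same list.
  let fin := (PySem.List.sorted acc.2.2.items (fun p => p.1) false).foldl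
      (fun (st : List (Int × Int × String) × Int) p => (pvEmitB st.1 st.2 p.1 p.2, p.1)) ([], lo)
  pvEmitB fin.1 fin.2 stk seed

-- ===== PRECONDITION & SPEC =====
def Spec_build_status_spans_carry_forward_py (polls_idx : List (Int × String)) (W : Int × Int) (out : List (Int × Int × String)) : Prop := out = build_status_spans_carry_forward_py_alt polls_idx W
instance (polls_idx : List (Int × String)) (W : Int × Int) (out : List (Int × Int × String)) : Decidable (Spec_build_status_spans_carry_forward_py polls_idx W out) := by unfold Spec_build_status_spans_carry_forward_py; infer_instance

-- ===== CLAIM (what is proved, stated in full; the proofs are below) =====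
def Claim_equal_build_status_spans_carry_forward_py : Prop := ∀ (polls_idx : List (Int × String)) (W : Int × Int), Dom_build_status_spans_carry_forward_py polls_idx W → Spec_build_status_spans_carry_forward_py polls_idx W (build_status_spans_carry_forward_py polls_idx W)

-- ===== LEMMAS AND PROOFS =====

-- The common skeleton both pipelines are reduced to: walking an ascending event list,
-- a span [cur, k) per event (zero-length ones skipped).
def pvSpanList (cur : Int) : List (Int × String) → List (Int × Int × String)
  | [] => []
  | p :: t => (if cur < p.1 then [(cur, p.1, p.2)] else []) ++ pvSpanList p.1 t

-- adjacent duplicate keys collapsed to the last entry of the block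
def pvCollapse : List (Int × String) → List (Int × String)
  | [] => []
  | [p] => [p]
  | p :: q :: t => if p.1 = q.1 then pvCollapse (q :: t) else p :: pvCollapse (q :: t)

-- ---- B's collecting loop, split into its three independent components ----
theorem pvFoldl_stepB (lo hi stk : Int) (l : List (Int × String))
    (st : Option (Int × String) × Option (Int × String) × PySem.Dict Int String) :
    l.foldl (pvStepB lo hi stk) st =
      (l.foldl (pvBestStep stk) st.1, l.foldl (pvFirstStep lo hi) st.2.1,
       l.foldl (pvDictStep lo hi) st.2.2) := by
  induction l generalizing st with
  | nil => rfl
  | cons p t ih => exact ih _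

theorem pvBest_eq_min? (stk : Int) (l : List (Int × String)) :
    l.foldl (pvBestStep stk) none =
      PySem.List.min? (l.filter (fun p => decide (stk ≤ p.1))) (fun p => p.1) := by
  rw [PySem.List.min?, List.foldl_filter]
  congr 1
  funext acc x
  simp only [pvBestStep]
  cases acc <;> rfl

theorem pvFirst_eq_min? (lo hi : Int) (l : List (Int × String)) :
    l.foldl (pvFirstStep lo hi) none =
      PySem.List.min? (l.filter (pvInWin lo hi)) (fun p => p.1) := by
  rw [PySem.List.min?, List.foldl_filter]
  congr 1
  funext acc x
  simp only [pvFirstStep]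
  cases acc <;> rfl

theorem pvDict_eq_filter (lo hi : Int) (l : List (Int × String)) (d : PySem.Dict Int String) :
    l.foldl (pvDictStep lo hi) d =
      (l.filter (pvInWin lo hi)).foldl (fun d p => d.insert p.1 p.2) d := by
  rw [List.foldl_filter]
  congr 1

-- ---- the dict as a function of the window list ----
theorem pvGet?_foldl_insert (l : List (Int × String)) (d0 : PySem.Dict Int String) (k : Int) :
    (l.foldl (fun d p => d.insert p.1 p.2) d0).get? k =
      (match (l.filter (fun r => decide (r.1 = k))).getLast? with
       | some r => some r.2
       | none => d0.get? k) := by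
  induction l using List.reverseRecOn generalizing d0 with
  | nil => rfl
  | append_singleton t r ih =>
    rw [List.foldl_append, List.filter_append]
    simp only [List.foldl_cons, List.foldl_nil, List.filter_cons, List.filter_nil]
    rw [PySem.Dict.get?_insert]
    by_cases hr : r.1 = k
    · simp only [hr, decide_true, if_true]
      rw [List.getLast?_concat]
    · simp only [hr, decide_false, Bool.false_eq_true, if_false, List.append_nil]
      rw [if_neg (fun h => hr h.symm)]
      exact ih d0

theorem pvKeys_foldl_insert (l : List (Int × String)) :
    (l.foldl (fun d p => d.insert p.1 p.2) PySem.Dict.empty).keys =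
      PySem.Set.ofList (l.map (fun p => p.1)) := by
  rw [PySem.Dict.keys_foldl_insert_key]
  rw [PySem.Dict.keys_empty, PySem.Set.update_nil_left]

theorem pvNodup_keys_foldl_insert (l : List (Int × String)) :
    (l.foldl (fun d p => d.insert p.1 p.2) PySem.Dict.empty).keys.Nodup := by
  exact PySem.Dict.nodup_keys_foldl_insert_key l (fun p => p.1) (fun d p => p.2) _ PySem.Dict.nodup_keys_empty

theorem pvMem_items_foldl_insert (l : List (Int × String)) (p : Int × String) :
    p ∈ (l.foldl (fun d p => d.insert p.1 p.2) PySem.Dict.empty).items ↔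
      (l.filter (fun r => decide (r.1 = p.1))).getLast? = some p := by
  obtain ⟨k0, v0⟩ := p
  have hiff : (l.foldl (fun d p => d.insert p.1 p.2) PySem.Dict.empty).get? k0 = some v0 ↔
      (k0, v0) ∈ (l.foldl (fun d p => d.insert p.1 p.2) PySem.Dict.empty).items :=
    ⟨fun h => PySem.Dict.mem_items_of_get?_eq_some _ h, fun h =>
      PySem.Dict.get?_of_mem_items _ h (pvNodup_keys_foldl_insert l)⟩
  rw [← hiff, pvGet?_foldl_insert]
  constructor
  · intro h
    rcases hg : (l.filter (fun r => decide (r.1 = (k0, v0).1))).getLast? with _ | r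
    · rw [hg] at h; simp [PySem.Dict.get?_empty] at h
    · rw [hg] at h
      have hr1 : r.1 = k0 := by
        have hm := List.mem_of_getLast? hg
        have := List.of_mem_filter hm
        simpa using this
      have hr2 : r.2 = v0 := by simpa using h
      rw [hg]
      exact congrArg some (Prod.ext hr1 hr2)
  · intro h
    rw [h]

-- ---- stability of the descending sort: equal-key subsequences are untouched ----
theorem pvFilter_insertBy_ne (x : Int × String) (ys : List (Int × String)) (c : Int)
    (hx : x.1 ≠ c) :
    (PySem.List.insertBy (fun a b => decide ((fun p : Int × String => -p.1) a < (fun p : Int × String => -p.1) b)) x ys).filter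
        (fun r => decide (r.1 = c)) =
      ys.filter (fun r => decide (r.1 = c)) := by
  induction ys with
  | nil => simp [PySem.List.insertBy, hx]
  | cons y ys ih =>
    show (if decide (-x.1 < -y.1) then x :: y :: ys else
        y :: PySem.List.insertBy _ x ys).filter (fun r => decide (r.1 = c)) = _
    by_cases hb : (-x.1 : Int) < -y.1
    · simp [hb, List.filter_cons, hx]
    · simp only [hb, decide_false, Bool.false_eq_true, if_false, List.filter_cons]
      rw [ih]

theorem pvFilter_insertBy_eq (x : Int × String) (ys : List (Int × String)) (c : Int)
    (hx : x.1 = c) (hys : ys.Pairwise (fun a b => b.1 ≤ a.1)) :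
    (PySem.List.insertBy (fun a b => decide ((fun p : Int × String => -p.1) a < (fun p : Int × String => -p.1) b)) x ys).filter
        (fun r => decide (r.1 = c)) =
      ys.filter (fun r => decide (r.1 = c)) ++ [x] := by
  induction ys with
  | nil => simp [PySem.List.insertBy, hx]
  | cons y ys ih =>
    show (if decide (-x.1 < -y.1) then x :: y :: ys else
        y :: PySem.List.insertBy _ x ys).filter (fun r => decide (r.1 = c)) = _
    by_cases hb : (-x.1 : Int) < -y.1
    · have hyc : y.1 < c := by omega
      have hnil : (y :: ys).filter (fun r => decide (r.1 = c)) = [] := by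
        rw [List.filter_eq_nil_iff]
        intro r hr
        rcases List.mem_cons.mp hr with h | h
        · subst h; simpa using Int.ne_of_lt hyc
        · have : r.1 ≤ y.1 := (List.pairwise_cons.mp hys).1 r h
          simp only [decide_eq_true_eq]
          omega
      rw [if_pos (by simpa using hb), List.filter_cons, if_pos (by simp [hx])]
      simp only [hnil]
      simp
    · simp only [hb, decide_false, Bool.false_eq_true, if_false, List.filter_cons]
      rw [ih (List.Pairwise.sublist (List.sublist_cons_self y ys) hys)]
      by_cases hy : y.1 = c <;> simp [hy]

theorem pvFilter_sorted_desc (xs : List (Int × String)) (c : Int) :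
    (PySem.List.sorted xs (fun p => -p.1) false).filter (fun r => decide (r.1 = c)) =
      xs.filter (fun r => decide (r.1 = c)) := by
  induction xs using List.reverseRecOn with
  | nil => rfl
  | append_singleton t x ih =>
    have hs : PySem.List.sorted (t ++ [x]) (fun p : Int × String => -p.1) false =
        PySem.List.insertBy
          (fun a b => decide ((fun p : Int × String => -p.1) a < (fun p : Int × String => -p.1) b))
          x (PySem.List.sorted t (fun p : Int × String => -p.1) false) := by
      rw [PySem.List.sorted_eq_foldl_insertBy, PySem.List.sorted_eq_foldl_insertBy,
        List.foldl_append]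
      rfl
    have hpw : (PySem.List.sorted t (fun p : Int × String => -p.1) false).Pairwise
        (fun a b => b.1 ≤ a.1) := by
      have := PySem.List.sorted_pairwise t (fun p : Int × String => -p.1)
      exact this.imp (fun h => by omega)
    rw [hs, List.filter_append]
    by_cases hx : x.1 = c
    · rw [pvFilter_insertBy_eq x _ c hx hpw, ih]
      simp [hx]
    · rw [pvFilter_insertBy_ne x _ c hx, ih]
      simp [hx]

-- ---- collapse lemmas ----
theorem pvStepA_absorb (st : List (Int × Int × String) × Int × String) (p q : Int × String)
    (h : p.1 = q.1) : pvStepA (pvStepA st p) q = pvStepA st q := by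
  obtain ⟨pk, ps⟩ := p
  obtain ⟨qk, qs⟩ := q
  simp only at h
  subst h
  simp [pvStepA]

theorem pvFoldl_collapse (l : List (Int × String)) (st : List (Int × Int × String) × Int × String) :
    l.foldl pvStepA st = (pvCollapse l).foldl pvStepA st := by
  induction l generalizing st with
  | nil => rfl
  | cons p rest ih =>
    cases rest with
    | nil => rfl
    | cons q t =>
      by_cases hpq : p.1 = q.1
      · show (q :: t).foldl pvStepA (pvStepA st p) = _
        rw [show (q :: t).foldl pvStepA (pvStepA st p) = t.foldl pvStepA (pvStepA (pvStepA st p) q) from rfl]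
        rw [pvStepA_absorb st p q hpq]
        rw [show t.foldl pvStepA (pvStepA st q) = (q :: t).foldl pvStepA st from rfl]
        rw [ih st]
        rw [show pvCollapse (p :: q :: t) = pvCollapse (q :: t) from by
          simp [pvCollapse, hpq]]
      · rw [show (p :: q :: t).foldl pvStepA st = (q :: t).foldl pvStepA (pvStepA st p) from rfl]
        rw [ih (pvStepA st p)]
        rw [show pvCollapse (p :: q :: t) = p :: pvCollapse (q :: t) from by
          simp [pvCollapse, hpq]]
        rfl

theorem pvCollapse_sublist (l : List (Int × String)) : (pvCollapse l).Sublist l := by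
  induction l with
  | nil => simp [pvCollapse]
  | cons p rest ih =>
    cases rest with
    | nil => simp [pvCollapse]
    | cons q t =>
      by_cases hpq : p.1 = q.1
      · rw [show pvCollapse (p :: q :: t) = pvCollapse (q :: t) from by simp [pvCollapse, hpq]]
        exact ih.trans (List.sublist_cons_self p (q :: t))
      · rw [show pvCollapse (p :: q :: t) = p :: pvCollapse (q :: t) from by
          simp [pvCollapse, hpq]]
        exact ih.cons₂ p

theorem pvCollapse_pairwise (l : List (Int × String)) (h : l.Pairwise (fun a b => b.1 ≤ a.1)) :
    (pvCollapse l).Pairwise (fun a b => b.1 < a.1) := by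
  induction l with
  | nil => simp [pvCollapse]
  | cons p rest ih =>
    cases rest with
    | nil => simp [pvCollapse]
    | cons q t =>
      have h' : (q :: t).Pairwise (fun a b => b.1 ≤ a.1) := (List.pairwise_cons.mp h).2
      by_cases hpq : p.1 = q.1
      · rw [show pvCollapse (p :: q :: t) = pvCollapse (q :: t) from by simp [pvCollapse, hpq]]
        exact ih h'
      · rw [show pvCollapse (p :: q :: t) = p :: pvCollapse (q :: t) from by
          simp [pvCollapse, hpq]]
        rw [List.pairwise_cons]
        refine ⟨?_, ih h'⟩
        intro r hr
        have hrm : r ∈ q :: t := (pvCollapse_sublist (q :: t)).mem hr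
        have hq : q.1 ≤ p.1 := (List.pairwise_cons.mp h).1 q (List.mem_cons_self)
        rcases List.mem_cons.mp hrm with h1 | h1
        · subst h1; omega
        · have : r.1 ≤ q.1 := (List.pairwise_cons.mp h').1 r h1
          omega

theorem pvMem_collapse (l : List (Int × String)) (h : l.Pairwise (fun a b => b.1 ≤ a.1))
    (p : Int × String) :
    p ∈ pvCollapse l ↔ (l.filter (fun r => decide (r.1 = p.1))).getLast? = some p := by
  induction l with
  | nil => simp [pvCollapse]
  | cons p0 rest ih =>
    cases rest with
    | nil =>
      simp only [pvCollapse, List.mem_singleton, List.filter_cons, List.filter_nil]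
      by_cases hp : p0.1 = p.1
      · simp only [hp, decide_true, if_true]
        constructor
        · intro h'; subst h'; rfl
        · intro h'; exact (Option.some.injEq _ _ ▸ h').symm ▸ rfl
      · simp only [hp, decide_false, Bool.false_eq_true, if_false]
        constructor
        · intro h'; subst h'; exact absurd rfl hp
        · intro h'; simp at h'
    | cons q t =>
      have h' : (q :: t).Pairwise (fun a b => b.1 ≤ a.1) := (List.pairwise_cons.mp h).2
      have hq : q.1 ≤ p0.1 := (List.pairwise_cons.mp h).1 q (List.mem_cons_self)
      by_cases hpq : p0.1 = q.1
      · rw [show pvCollapse (p0 :: q :: t) = pvCollapse (q :: t) from by simp [pvCollapse, hpq]]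
        rw [ih h']
        by_cases hp : p0.1 = p.1
        · have hqp : q.1 = p.1 := by omega
          have hf : (p0 :: q :: t).filter (fun r => decide (r.1 = p.1)) =
              p0 :: q :: t.filter (fun r => decide (r.1 = p.1)) := by
            simp [hp, hqp]
          rw [hf, show (q :: t).filter (fun r => decide (r.1 = p.1)) =
              q :: t.filter (fun r => decide (r.1 = p.1)) from by
            simp [hqp], List.getLast?_cons_cons]
        · have hf : (p0 :: q :: t).filter (fun r => decide (r.1 = p.1)) =
              (q :: t).filter (fun r => decide (r.1 = p.1)) := by
            rw [List.filter_cons, if_neg (by simp [hp])]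
          rw [hf]
      · rw [show pvCollapse (p0 :: q :: t) = p0 :: pvCollapse (q :: t) from by
          simp [pvCollapse, hpq]]
        rw [List.mem_cons, ih h']
        by_cases hp : p0.1 = p.1
        · have hqp : q.1 < p.1 := by omega
          have hnil : (q :: t).filter (fun r => decide (r.1 = p.1)) = [] := by
            rw [List.filter_eq_nil_iff]
            intro r hr
            rcases List.mem_cons.mp hr with h1 | h1
            · subst h1; simpa using Int.ne_of_lt hqp
            · have : r.1 ≤ q.1 := (List.pairwise_cons.mp h').1 r h1
              simp only [decide_eq_true_eq]
              omega
          have hf : (p0 :: q :: t).filter (fun r => decide (r.1 = p.1)) = [p0] := by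
            rw [List.filter_cons, if_pos (by simp [hp]), hnil]
          rw [hf, hnil]
          simp only [List.getLast?_singleton]
          constructor
          · rintro (h1 | h1)
            · subst h1; rfl
            · simp at h1
          · intro h1
            exact Or.inl (Option.some_injective _ h1).symm
        · have hf : (p0 :: q :: t).filter (fun r => decide (r.1 = p.1)) =
              (q :: t).filter (fun r => decide (r.1 = p.1)) := by
            rw [List.filter_cons, if_neg (by simp [hp])]
          rw [hf]
          constructor
          · rintro (h1 | h1)
            · subst h1; exact absurd rfl hp
            · exact h1
          · intro h1; exact Or.inr h1

-- ---- generic ordered-assoc-list facts ----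
theorem pvPairwise_lt_of_le_of_nodup (l : List (Int × String))
    (hle : l.Pairwise (fun a b => a.1 ≤ b.1)) (hnd : (l.map (fun p => p.1)).Nodup) :
    l.Pairwise (fun a b => a.1 < b.1) := by
  induction l with
  | nil => simp
  | cons a t ih =>
    rw [List.pairwise_cons] at hle ⊢
    rw [List.map_cons, List.nodup_cons] at hnd
    refine ⟨?_, ih hle.2 hnd.2⟩
    intro b hb
    have h1 := hle.1 b hb
    have h2 : a.1 ≠ b.1 := fun h => hnd.1 (h ▸ List.mem_map_of_mem hb)
    omega

theorem pvEq_of_perm_of_pairwise_gt (l1 l2 : List (Int × String)) (hp : l1.Perm l2)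
    (h1 : l1.Pairwise (fun a b => b.1 < a.1)) (h2 : l2.Pairwise (fun a b => b.1 < a.1)) :
    l1 = l2 := by
  exact List.Perm.eq_of_pairwise
    (fun a b _ _ hab hba => absurd (lt_trans hab hba) (lt_irrefl _)) h1 h2 hp

-- ascending chain of keys starting at cur
def pvChain (cur : Int) : List Int → Prop
  | [] => True
  | k :: t => cur ≤ k ∧ pvChain k t

-- ---- spanList lemmas ----
theorem pvSpanList_append_singleton (X : List (Int × String)) (cur : Int) (pr : Int × String) :
    pvSpanList cur (X ++ [pr]) =
      pvSpanList cur X ++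
        (if (X.map (fun p => p.1)).getLastD cur < pr.1 then
          [((X.map (fun p => p.1)).getLastD cur, pr.1, pr.2)] else []) := by
  induction X generalizing cur with
  | nil => simp [pvSpanList]
  | cons p X ih =>
    simp only [List.cons_append, pvSpanList, ih p.1, List.map_cons, List.getLastD_cons,
      List.append_assoc]

theorem pvSpanList_start_ge (E : List (Int × String)) (cur : Int)
    (hch : pvChain cur (E.map (fun p => p.1))) :
    ∀ sp ∈ pvSpanList cur E, cur ≤ sp.1 := by
  induction E generalizing cur with
  | nil => simp [pvSpanList]
  | cons p t ih =>
    obtain ⟨h1, h2⟩ := hch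
    intro sp hsp
    rcases List.mem_append.mp hsp with h | h
    · split_ifs at h with hc
      · rcases List.mem_singleton.mp h with rfl; rfl
      · simp at h
    · exact le_trans h1 (ih p.1 h2 sp h)

theorem pvSpanList_pairwise (E : List (Int × String)) (cur : Int)
    (hch : pvChain cur (E.map (fun p => p.1))) :
    (pvSpanList cur E).Pairwise (fun a b => a.1 < b.1) := by
  induction E generalizing cur with
  | nil => simp [pvSpanList]
  | cons p t ih =>
    obtain ⟨h1, h2⟩ := hch
    show ((if cur < p.1 then [(cur, p.1, p.2)] else []) ++ pvSpanList p.1 t).Pairwise _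
    split_ifs with hc
    · rw [List.singleton_append, List.pairwise_cons]
      refine ⟨?_, ih p.1 h2⟩
      intro sp hsp
      have := pvSpanList_start_ge t p.1 h2 sp hsp
      simpa using lt_of_lt_of_le hc this
    · rw [List.nil_append]
      exact ih p.1 h2

-- ---- A's descending pass + tail rebuilt as a reversed ascending spanList ----
theorem pvDescSpans (lo : Int) :
    ∀ (D : List (Int × String)) (spans0 : List (Int × Int × String)) (topk : Int) (tops : String),
    D.Pairwise (fun a b => b.1 < a.1) → (∀ p ∈ D, lo ≤ p.1 ∧ p.1 ≤ topk) → lo ≤ topk →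
    (let r := D.foldl pvStepA (spans0, topk, tops)
     if min lo r.2.1 < max lo r.2.1 then r.1 ++ [(min lo r.2.1, max lo r.2.1, r.2.2)] else r.1) =
      spans0 ++ (pvSpanList lo (D.reverse ++ [(topk, tops)])).reverse := by
  intro D
  induction D with
  | nil =>
    intro spans0 topk tops _ _ hlo
    simp only [List.foldl_nil]
    rw [min_eq_left hlo, max_eq_right hlo]
    simp only [List.reverse_nil, List.nil_append]
    rw [show pvSpanList lo [(topk, tops)] =
        (if lo < topk then [(lo, topk, tops)] else []) ++ [] from rfl]
    split_ifs with hc <;> simp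
  | cons p D ih =>
    intro spans0 topk tops hpw hb hlo
    have hp1 : p.1 ≤ topk := (hb p List.mem_cons_self).2
    have hp0 : lo ≤ p.1 := (hb p List.mem_cons_self).1
    have hstep : pvStepA (spans0, topk, tops) p =
        (spans0 ++ (if p.1 < topk then [(p.1, topk, tops)] else []), p.1, p.2) := by
      simp only [pvStepA, min_eq_left hp1, max_eq_right hp1]
      split_ifs <;> simp
    have hpw' : D.Pairwise (fun a b => b.1 < a.1) := (List.pairwise_cons.mp hpw).2
    have hb' : ∀ r ∈ D, lo ≤ r.1 ∧ r.1 ≤ p.1 := by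
      intro r hr
      exact ⟨(hb r (List.mem_cons_of_mem p hr)).1,
        le_of_lt ((List.pairwise_cons.mp hpw).1 r hr)⟩
    simp only [List.foldl_cons, hstep]
    have hih := ih (spans0 ++ (if p.1 < topk then [(p.1, topk, tops)] else [])) p.1 p.2 hpw' hb' hp0
    rw [hih]
    have hlist : (p :: D).reverse ++ [(topk, tops)] = (D.reverse ++ [p]) ++ [(topk, tops)] := by
      simp
    have hR := pvSpanList_append_singleton (D.reverse ++ [p]) lo (topk, tops)
    have hlast : ((D.reverse ++ [p]).map (fun p => p.1)).getLastD lo = p.1 := by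
      rw [List.map_append]
      simp
    rw [hlast] at hR
    rw [hlist, hR, List.reverse_append]
    have hifrev : ((if p.1 < topk then [((p.1 : Int), topk, tops)] else []) : List (Int × Int × String)).reverse
        = (if p.1 < topk then [(p.1, topk, tops)] else []) := by
      split_ifs <;> simp
    rw [hifrev]
    simp [List.append_assoc]

-- ---- B's sweep is A's merge pass applied to the same spanList ----
theorem pvSweep_eq_merge (E : List (Int × String)) :
    ∀ (out : List (Int × Int × String)) (cur : Int),
    (∀ last, out.getLast? = some last → last.2.1 = cur) →
    pvChain cur (E.map (fun p => p.1)) →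
    (E.foldl (fun (st : List (Int × Int × String) × Int) p => (pvEmitB st.1 st.2 p.1 p.2, p.1))
        (out, cur)).1 =
      (pvSpanList cur E).foldl pvMergeA out := by
  induction E with
  | nil => intro out cur _ _; rfl
  | cons p t ih =>
    intro out cur hinv hch
    obtain ⟨h1, h2⟩ := hch
    show (t.foldl _ (pvEmitB out cur p.1 p.2, p.1)).1 = _
    show _ = ((if cur < p.1 then [(cur, p.1, p.2)] else []) ++ pvSpanList p.1 t).foldl pvMergeA out
    rw [List.foldl_append]
    by_cases hc : cur < p.1
    · have hout : pvEmitB out cur p.1 p.2 = pvMergeA out (cur, p.1, p.2) := by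
        simp only [pvEmitB, pvMergeA, if_pos hc]
        cases hout : out.getLast? with
        | none => rfl
        | some last =>
          have hl := hinv last hout
          dsimp only
          by_cases hs : last.2.2 = p.2
          · rw [if_pos hs, if_pos ⟨hs, hl⟩]
          · rw [if_neg hs, if_neg (fun hh => hs hh.1)]
      have hinv' : ∀ last, (pvEmitB out cur p.1 p.2).getLast? = some last → last.2.1 = p.1 := by
        rw [hout]
        intro last hl
        simp only [pvMergeA] at hl
        cases hout2 : out.getLast? with
        | none =>
          rw [hout2] at hl
          dsimp only at hl
          rw [List.getLast?_concat] at hl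
          cases hl; rfl
        | some l2 =>
          rw [hout2] at hl
          dsimp only at hl
          split_ifs at hl <;> rw [List.getLast?_concat] at hl <;> (cases hl; rfl)
      rw [if_pos hc]
      simp only [List.foldl_cons, List.foldl_nil]
      rw [ih (pvEmitB out cur p.1 p.2) p.1 hinv' h2, hout]
    · have hcur : cur = p.1 := le_antisymm h1 (not_lt.mp hc)
      have hemit : pvEmitB out cur p.1 p.2 = out := by
        simp [pvEmitB, hc]
      rw [if_neg hc, List.foldl_nil, hemit]
      exact ih out p.1 (fun last hl => (hinv last hl).trans hcur) h2

theorem pvChain_of_pairwise (L : List (Int × String)) (lo stk : Int) (s : String)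
    (hp : L.Pairwise (fun a b => a.1 < b.1)) (hb : ∀ p ∈ L, lo ≤ p.1 ∧ p.1 ≤ stk)
    (hls : lo ≤ stk) :
    pvChain lo ((L ++ [(stk, s)]).map (fun p => p.1)) := by
  induction L generalizing lo with
  | nil => exact ⟨hls, trivial⟩
  | cons p t ih =>
    rw [List.pairwise_cons] at hp
    refine ⟨(hb p List.mem_cons_self).1, ?_⟩
    exact ih p.1 hp.2 (fun r hr => ⟨le_of_lt (hp.1 r hr), (hb r (List.mem_cons_of_mem p hr)).2⟩)
      (hb p List.mem_cons_self).2

-- the two nonempty-window pipelines agree, for any seed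
theorem pvCore (polls : List (Int × String)) (lo hi : Int) (seed : String)
    (hwne : polls.filter (pvInWin lo hi) ≠ []) :
    (let win := polls.filter (pvInWin lo hi)
     let stk := hi - 1
     let st := (PySem.List.sorted win (fun p => -p.1) false).foldl pvStepA ([], stk, seed)
     let spans := if min lo st.2.1 < max lo st.2.1 then
         st.1 ++ [(min lo st.2.1, max lo st.2.1, st.2.2)] else st.1
     (PySem.List.sorted spans (fun x => x.1) false).foldl pvMergeA []) =
    (let win := polls.filter (pvInWin lo hi)
     let stk := hi - 1
     let d := win.foldl (fun d p => d.insert p.1 p.2) PySem.Dict.empty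
     let fin := (PySem.List.sorted d.items (fun p => p.1) false).foldl
        (fun (st : List (Int × Int × String) × Int) p => (pvEmitB st.1 st.2 p.1 p.2, p.1)) ([], lo)
     pvEmitB fin.1 fin.2 stk seed) := by
  dsimp only
  have hbounds : ∀ p ∈ polls.filter (pvInWin lo hi), lo ≤ p.1 ∧ p.1 < hi := by
    intro p hp
    have := List.of_mem_filter hp
    simp only [pvInWin, Bool.and_eq_true, decide_eq_true_eq] at this
    exact this
  have hlostk : lo ≤ hi - 1 := by
    rcases List.exists_mem_of_ne_nil _ hwne with ⟨p, hp⟩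
    have := hbounds p hp
    omega
  set win := polls.filter (pvInWin lo hi) with hwindef
  set d := win.foldl (fun d p => d.insert p.1 p.2) PySem.Dict.empty with hddef
  set L := PySem.List.sorted d.items (fun p : Int × String => p.1) false with hLdef
  have hLperm : L.Perm d.items := PySem.List.sorted_perm d.items _ false
  have hkeysnd : (d.items.map (fun p : Int × String => p.1)).Nodup := by
    have := pvNodup_keys_foldl_insert win
    simpa only [PySem.Dict.keys, hddef] using this
  have hLkeysnd : (L.map (fun p : Int × String => p.1)).Nodup :=
    ((hLperm.map (fun p : Int × String => p.1)).nodup_iff).mpr hkeysnd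
  have hLlt : L.Pairwise (fun a b => a.1 < b.1) :=
    pvPairwise_lt_of_le_of_nodup L (PySem.List.sorted_pairwise d.items _) hLkeysnd
  have hLmem : ∀ p, p ∈ L ↔ (win.filter (fun r => decide (r.1 = p.1))).getLast? = some p := by
    intro p
    rw [hLdef, PySem.List.mem_sorted, hddef, pvMem_items_foldl_insert]
  have hLbounds : ∀ p ∈ L, lo ≤ p.1 ∧ p.1 ≤ hi - 1 := by
    intro p hp
    have hg := (hLmem p).mp hp
    have hp2 : p ∈ win.filter (fun r => decide (r.1 = p.1)) := List.mem_of_getLast? hg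
    have hp3 : p ∈ win := List.mem_of_mem_filter hp2
    have := hbounds p hp3
    omega
  set dw := PySem.List.sorted win (fun p : Int × String => -p.1) false with hdwdef
  have hdwpw : dw.Pairwise (fun a b => b.1 ≤ a.1) := by
    have := PySem.List.sorted_pairwise win (fun p : Int × String => -p.1)
    exact this.imp (fun h => by omega)
  have hrevlt : (L.reverse).Pairwise (fun a b => b.1 < a.1) := by
    rw [List.pairwise_reverse]
    exact hLlt
  have hCL : pvCollapse dw = L.reverse := by
    apply pvEq_of_perm_of_pairwise_gt _ _ _ (pvCollapse_pairwise dw hdwpw) hrevlt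
    apply (List.perm_ext_iff_of_nodup ?_ ?_).mpr
    · intro p
      rw [pvMem_collapse dw hdwpw p, hdwdef, pvFilter_sorted_desc, List.mem_reverse, hLmem p]
    · have hne : (pvCollapse dw).Pairwise (fun a b => a ≠ b) :=
        (pvCollapse_pairwise dw hdwpw).imp (fun h heq => by subst heq; exact lt_irrefl _ h)
      exact hne
    · have hne : (L.reverse).Pairwise (fun a b => a ≠ b) :=
        hrevlt.imp (fun h heq => by subst heq; exact lt_irrefl _ h)
      exact hne
  rw [pvFoldl_collapse dw ([], hi - 1, seed), hCL]
  have hrevbounds : ∀ p ∈ L.reverse, lo ≤ p.1 ∧ p.1 ≤ hi - 1 := by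
    intro p hp
    exact hLbounds p (List.mem_reverse.mp hp)
  have hA := pvDescSpans lo L.reverse [] (hi - 1) seed hrevlt hrevbounds hlostk
  dsimp only at hA
  rw [hA, List.reverse_reverse, List.nil_append]
  have hchain : pvChain lo ((L ++ [(hi - 1, seed)]).map (fun p : Int × String => p.1)) :=
    pvChain_of_pairwise L lo (hi - 1) seed hLlt hLbounds hlostk
  have hsort : PySem.List.sorted ((pvSpanList lo (L ++ [(hi - 1, seed)])).reverse)
      (fun x : Int × Int × String => x.1) false = pvSpanList lo (L ++ [(hi - 1, seed)]) :=
    PySem.List.sorted_eq_of_perm_of_pairwise_lt _ _ _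
      (List.reverse_perm _).symm (pvSpanList_pairwise _ lo hchain)
  rw [hsort]
  have hB : pvEmitB (L.foldl (fun (st : List (Int × Int × String) × Int) p =>
        (pvEmitB st.1 st.2 p.1 p.2, p.1)) ([], lo)).1
      (L.foldl (fun (st : List (Int × Int × String) × Int) p =>
        (pvEmitB st.1 st.2 p.1 p.2, p.1)) ([], lo)).2 (hi - 1) seed
      = ((L ++ [(hi - 1, seed)]).foldl (fun (st : List (Int × Int × String) × Int) p =>
        (pvEmitB st.1 st.2 p.1 p.2, p.1)) ([], lo)).1 := by
    rw [List.foldl_append]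
    rfl
  rw [hB, pvSweep_eq_merge _ [] lo (by simp) hchain]

-- a dict built over the window is empty exactly when the window is
theorem pvItems_empty_iff (win : List (Int × String)) :
    (win.foldl (fun d p => d.insert p.1 p.2) PySem.Dict.empty).items = [] ↔ win = [] := by
  constructor
  · intro h
    cases hw : win with
    | nil => rfl
    | cons r t =>
      exfalso
      have hk : (win.foldl (fun d p => d.insert p.1 p.2) PySem.Dict.empty).keys =
          PySem.Set.ofList (win.map (fun p => p.1)) := pvKeys_foldl_insert win
      have hmem : r.1 ∈ PySem.Set.ofList (win.map (fun p => p.1)) := by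
        rw [PySem.Set.mem_ofList]
        exact List.mem_map_of_mem (hw ▸ List.mem_cons_self)
      rw [← hk] at hmem
      simp only [PySem.Dict.keys] at hmem
      rw [h] at hmem
      simp at hmem
  · intro h
    rw [h]
    rfl

-- ===== VERDICT (by name: the statement is the Claim_ definition above) =====
theorem build_status_spans_carry_forward_py_spec : Claim_equal_build_status_spans_carry_forward_py := by
  intro polls W _
  show build_status_spans_carry_forward_py polls W = build_status_spans_carry_forward_py_alt polls W
  by_cases hnil : polls = []
  · subst hnil
    rfl
  · simp only [build_status_spans_carry_forward_py, build_status_spans_carry_forward_py_alt,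
      if_neg hnil]
    rw [pvFoldl_stepB]
    dsimp only
    rw [pvBest_eq_min?, pvFirst_eq_min?, pvDict_eq_filter]
    by_cases hwin : polls.filter (pvInWin W.1 W.2) = []
    · rw [if_pos hwin, if_pos ((pvItems_empty_iff _).mpr hwin)]
    · rw [if_neg hwin, if_neg (fun h => hwin ((pvItems_empty_iff _).mp h))]
      exact pvCore polls W.1 W.2 _ hwin
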